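-- pv_equiv track=rewrite | github.com/YuvalGerzii/one_colsilidated_app | labor_transofrmation/Labor-market-disruption-inequality/backend/app/models/networking_intelligence.py | _get_strength_distribution
-- ===== SOURCE A (Python) =====
-- from typing import Dict, List, Any, Optional, Set
--
-- def _get_strength_distribution(connections: List[Dict[str, Any]]) -> Dict[str, int]:
--     """Get distribution of connection strengths"""
--     distribution = {"strong": 0, "moderate": 0, "weak": 0}
--
--     for conn in connections:
--         days_inactive = conn.get("days_since_last_interaction", 365)
--         if days_inactive <= 30:
--             distribution["strong"] += 1
--         elif days_inactive <= 90:
--             distribution["moderate"] += 1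
--         else:
--             distribution["weak"] += 1
--
--     return distribution
-- ===== SOURCE B (Python) =====
-- from typing import Dict, List, Any, Optional, Set
--
-- def _get_strength_distribution(connections: List[Dict[str, Any]]) -> Dict[str, int]:
--     """Get distribution of connection strengths (independent counting passes)."""
--     days = [c.get("days_since_last_interaction", 365) for c in connections]
--     strong = sum(1 for d in days if d <= 30)
--     moderate = sum(1 for d in days if 30 < d <= 90)
--     weak = len(days) - strong - moderate
--     return {"strong": strong, "moderate": moderate, "weak": weak}
-- ===== Notes on version B (the rewrite author's own statement) =====
-- stated objective: simpler
-- what changed: Replaces the single branching loop that mutates a counter dict with one extraction pass for the inactivity values plus independent counting passes per bucket, deriving 'weak' arithmetically from the total.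
import Mathlib
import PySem

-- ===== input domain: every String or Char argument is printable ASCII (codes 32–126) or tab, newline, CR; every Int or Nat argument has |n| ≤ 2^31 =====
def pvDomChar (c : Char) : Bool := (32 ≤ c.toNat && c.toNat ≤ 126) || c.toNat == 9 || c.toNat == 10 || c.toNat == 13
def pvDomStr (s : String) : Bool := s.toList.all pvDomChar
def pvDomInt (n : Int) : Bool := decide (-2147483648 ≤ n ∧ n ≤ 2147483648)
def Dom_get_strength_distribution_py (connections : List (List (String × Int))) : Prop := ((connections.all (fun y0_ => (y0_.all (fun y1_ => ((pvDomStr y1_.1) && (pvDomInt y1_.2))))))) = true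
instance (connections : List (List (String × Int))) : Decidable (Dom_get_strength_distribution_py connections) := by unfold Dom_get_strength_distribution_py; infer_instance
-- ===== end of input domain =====

-- B replaces A's single branching loop over a mutable counter dict by an extraction pass
-- plus independent counting passes per bucket ('weak' derived from the total): simpler decomposition.

-- ===== PORT A =====
-- conn.get("days_since_last_interaction", 365): first-match lookup in the association list
def pvConnGet (conn : List (String × Int)) : Int :=
  PySem.Dict.getD (PySem.Dict.mk conn) "days_since_last_interaction" 365

def get_strength_distribution_py (connections : List (List (String × Int))) : List (String × Int) :=
  let distribution : PySem.Dict String Int :=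
    PySem.Dict.mk [("strong", 0), ("moderate", 0), ("weak", 0)]
  let final := connections.foldl (fun d conn =>
    let days_inactive := pvConnGet conn
    if days_inactive ≤ 30 then d.modify "strong" 0 (· + 1)
    else if days_inactive ≤ 90 then d.modify "moderate" 0 (· + 1)
    else d.modify "weak" 0 (· + 1)) distribution
  final.items

-- ===== PORT B =====
def get_strength_distribution_py_alt (connections : List (List (String × Int))) : List (String × Int) :=
  let days := connections.map pvConnGet
  let strong : Int := (days.countP (fun d => d ≤ 30) : Int)
  let moderate : Int := (days.countP (fun d => 30 < d && d ≤ 90) : Int)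
  let weak : Int := (days.length : Int) - strong - moderate
  [("strong", strong), ("moderate", moderate), ("weak", weak)]

-- ===== PRECONDITION & SPEC =====
def Spec_get_strength_distribution_py (connections : List (List (String × Int))) (out : List (String × Int)) : Prop := out = get_strength_distribution_py_alt connections
instance (connections : List (List (String × Int))) (out : List (String × Int)) : Decidable (Spec_get_strength_distribution_py connections out) := by unfold Spec_get_strength_distribution_py; infer_instance

-- ===== CLAIM (what is proved, stated in full; the proofs are below) =====
def Claim_equal_get_strength_distribution_py : Prop := ∀ (connections : List (List (String × Int))), Dom_get_strength_distribution_py connections → Spec_get_strength_distribution_py connections (get_strength_distribution_py connections)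

-- ===== LEMMAS AND PROOFS =====

-- Loop invariant: A's fold over any starting counters (a, b, c) accumulates B's three counts.
theorem pv_fold_counts (l : List (List (String × Int))) (a b c : Int) :
    (l.foldl (fun d conn =>
      let days_inactive := pvConnGet conn
      if days_inactive ≤ 30 then d.modify "strong" 0 (· + 1)
      else if days_inactive ≤ 90 then d.modify "moderate" 0 (· + 1)
      else d.modify "weak" 0 (· + 1))
      (PySem.Dict.mk [("strong", a), ("moderate", b), ("weak", c)])).items
    = [("strong", a + ((l.map pvConnGet).countP (fun d => d ≤ 30) : Int)),
       ("moderate", b + ((l.map pvConnGet).countP (fun d => 30 < d && d ≤ 90) : Int)),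
       ("weak", c + (((l.map pvConnGet).length : Int)
          - ((l.map pvConnGet).countP (fun d => d ≤ 30) : Int)
          - ((l.map pvConnGet).countP (fun d => 30 < d && d ≤ 90) : Int)))] := by
  induction l generalizing a b c with
  | nil => simp
  | cons x xs ih =>
    simp only [List.foldl_cons, List.map_cons, List.countP_cons, List.length_cons]
    by_cases h1 : pvConnGet x ≤ 30
    · have hstep : (PySem.Dict.mk [("strong", a), ("moderate", b), ("weak", c)]).modify "strong" 0 (· + 1)
          = PySem.Dict.mk [("strong", a + 1), ("moderate", b), ("weak", c)] := by
        apply PySem.Dict.ext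
        simp [PySem.Dict.modify, PySem.Dict.insert, PySem.Dict.getD, PySem.Dict.get?]
      have hs : decide (pvConnGet x ≤ 30) = true := by simpa using h1
      have hm : (decide (30 < pvConnGet x) && decide (pvConnGet x ≤ 90)) = false := by
        simp only [Bool.and_eq_false_iff, decide_eq_false_iff_not]; left; omega
      simp only [if_pos h1, hstep, ih, hs, hm, if_true, List.cons.injEq,
        Prod.mk.injEq, and_true, true_and]
      push_cast
      omega
    · by_cases h2 : pvConnGet x ≤ 90
      · have hstep : (PySem.Dict.mk [("strong", a), ("moderate", b), ("weak", c)]).modify "moderate" 0 (· + 1)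
            = PySem.Dict.mk [("strong", a), ("moderate", b + 1), ("weak", c)] := by
          apply PySem.Dict.ext
          simp [PySem.Dict.modify, PySem.Dict.insert, PySem.Dict.getD, PySem.Dict.get?]
        have hs : decide (pvConnGet x ≤ 30) = false := by simpa using h1
        have hm : (decide (30 < pvConnGet x) && decide (pvConnGet x ≤ 90)) = true := by
          simp only [Bool.and_eq_true, decide_eq_true_eq]; omega
        simp only [if_neg h1, if_pos h2, hstep, ih, hs, hm,
          List.cons.injEq, Prod.mk.injEq, and_true, true_and]
        simp only [Bool.false_eq_true, if_false]
        push_cast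
        omega
      · have hstep : (PySem.Dict.mk [("strong", a), ("moderate", b), ("weak", c)]).modify "weak" 0 (· + 1)
            = PySem.Dict.mk [("strong", a), ("moderate", b), ("weak", c + 1)] := by
          apply PySem.Dict.ext
          simp [PySem.Dict.modify, PySem.Dict.insert, PySem.Dict.getD, PySem.Dict.get?]
        have hs : decide (pvConnGet x ≤ 30) = false := by simpa using h1
        have hm : (decide (30 < pvConnGet x) && decide (pvConnGet x ≤ 90)) = false := by
          simp only [Bool.and_eq_false_iff, decide_eq_false_iff_not]; right; omega
        simp only [if_neg h1, if_neg h2, hstep, ih, hs, hm,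
          List.cons.injEq, Prod.mk.injEq, and_true, true_and]
        simp only [Bool.false_eq_true, if_false]
        push_cast
        omega

-- ===== VERDICT (by name: the statement is the Claim_ definition above) =====
theorem get_strength_distribution_py_spec : Claim_equal_get_strength_distribution_py := by
  intro connections _
  show _ = _
  unfold get_strength_distribution_py get_strength_distribution_py_alt
  simp only [pv_fold_counts connections 0 0 0, zero_add]
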